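-- pv_equiv track=rewrite | github.com/contentrise/persplan-automation | personalbogen-phraser.py | merge_pages_dicts
-- ===== SOURCE A (Python) =====
-- def merge_pages_dicts(dicts: list[dict]) -> dict:
--     out = {}
--     for d in dicts:
--         for k, v in d.items():
--             if k not in out or (isinstance(v, str) and v and out.get(k, "") == ""):
--                 out[k] = v
--             elif isinstance(v, str) and v and out.get(k, "") and v != out[k]:
--                 # Keep the first; but if it is a checkbox pair "Ja/Nein", prefer "X"
--                 if v == "X":
--                     out[k] = "X"
--     return out
-- ===== SOURCE B (Python) =====
-- def merge_pages_dicts(dicts: list[dict]) -> dict: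
--     # Two passes: collect all candidate values per key in global order, then
--     # resolve each key's candidates with a left fold implementing the
--     # first-wins / empty-string-override / "X"-preference rules.
--     groups = {}
--     for d in dicts:
--         for k, v in d.items():
--             groups.setdefault(k, []).append(v)
--     out = {}
--     for k, vals in groups.items():
--         cur = vals[0]
--         for v in vals[1:]:
--             if isinstance(v, str) and v and cur == "":
--                 cur = v
--             elif isinstance(v, str) and v and cur and v != cur and v == "X":
--                 cur = "X"
--         out[k] = cur
--     return out
-- ===== Notes on version B (the rewrite author's own statement) =====
-- stated objective: alternative
-- what changed: A resolves precedence while streaming pairs into one dict; B first groups all candidate values per key in global order and then resolves each group with a separate left fold over its value list.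
import Mathlib
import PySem

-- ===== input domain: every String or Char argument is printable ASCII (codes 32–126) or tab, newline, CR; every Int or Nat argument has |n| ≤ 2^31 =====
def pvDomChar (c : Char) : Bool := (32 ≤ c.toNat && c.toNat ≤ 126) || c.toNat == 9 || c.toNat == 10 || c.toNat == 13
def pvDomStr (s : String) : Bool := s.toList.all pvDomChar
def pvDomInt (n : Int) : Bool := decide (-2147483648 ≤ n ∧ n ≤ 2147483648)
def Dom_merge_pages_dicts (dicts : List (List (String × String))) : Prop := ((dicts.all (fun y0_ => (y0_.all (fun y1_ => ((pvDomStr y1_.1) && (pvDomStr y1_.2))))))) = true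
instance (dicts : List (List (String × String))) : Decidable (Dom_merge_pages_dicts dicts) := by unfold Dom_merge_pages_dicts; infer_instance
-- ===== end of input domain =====

-- B replaces A's streaming merge with a two-pass decomposition (group all candidate values per key, then resolve each group by a left fold); objective: alternative structure, same cost.


-- ===== PORT A =====
-- one pass over all (key, value) pairs, maintaining the merged dict directly
def mergeStepA (out : PySem.Dict String String) (kv : String × String) : PySem.Dict String String :=
  if out.contains kv.1 = false ∨ (kv.2 ≠ "" ∧ out.getD kv.1 "" = "") then
    out.insert kv.1 kv.2
  else if kv.2 ≠ "" ∧ out.getD kv.1 "" ≠ "" ∧ kv.2 ≠ out.getD kv.1 "" then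
    (if kv.2 = "X" then out.insert kv.1 "X" else out)
  else out

def merge_pages_dicts (dicts : List (List (String × String))) : List (String × String) :=
  (dicts.foldl (fun out d => d.foldl mergeStepA out) PySem.Dict.empty).items

-- ===== PORT B =====
-- B: first collect all candidate values per key (global order), then resolve each group
def resolveStep (cur v : String) : String :=
  if v ≠ "" ∧ cur = "" then v
  else if v ≠ "" ∧ cur ≠ "" ∧ v ≠ cur ∧ v = "X" then "X"
  else cur

-- vals[0] / vals[1:]; groups never store empty lists, so the [] case is unreachable
def resolveGroup (vals : List String) : String :=
  match vals with
  | [] => ""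
  | v :: rest => rest.foldl resolveStep v

def merge_pages_dicts_alt (dicts : List (List (String × String))) : List (String × String) :=
  let groups := dicts.foldl
    (fun g d => d.foldl (fun g p => g.modify p.1 [] (· ++ [p.2])) g) PySem.Dict.empty
  (groups.items.foldl (fun out p => out.insert p.1 (resolveGroup p.2)) PySem.Dict.empty).items

-- ===== PRECONDITION & SPEC =====
def Spec_merge_pages_dicts (dicts : List (List (String × String))) (out : List (String × String)) : Prop := out = merge_pages_dicts_alt dicts
instance (dicts : List (List (String × String))) (out : List (String × String)) : Decidable (Spec_merge_pages_dicts dicts out) := by unfold Spec_merge_pages_dicts; infer_instance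

-- ===== CLAIM (what is proved, stated in full; the proofs are below) =====
def Claim_equal_merge_pages_dicts : Prop := ∀ (dicts : List (List (String × String))), Dom_merge_pages_dicts dicts → Spec_merge_pages_dicts dicts (merge_pages_dicts dicts)

-- ===== LEMMAS AND PROOFS =====

-- values recorded for key k, in global order
def vsOf (L : List (String × String)) (k : String) : List String :=
  (L.filter (fun p => p.1 == k)).map (·.2)

theorem contains_stepA (d : PySem.Dict String String) (p : String × String) (k : String) :
    (mergeStepA d p).contains k = (k == p.1 || d.contains k) := by
  have hbranch : d.contains p.1 = true → d.contains k = (k == p.1 || d.contains k) := by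
    intro h; by_cases hk : k = p.1
    · subst hk; simp [h]
    · simp [hk]
  unfold mergeStepA
  split_ifs with h1 h2 h3
  · simp [PySem.Dict.contains_insert]
  · simp [PySem.Dict.contains_insert]
  · exact hbranch (by by_cases hc : d.contains p.1 <;> simp_all)
  · exact hbranch (by by_cases hc : d.contains p.1 <;> simp_all)

theorem getD_stepA_ne (d : PySem.Dict String String) (p : String × String) (k : String)
    (h : k ≠ p.1) : (mergeStepA d p).getD k "" = d.getD k "" := by
  unfold mergeStepA
  split_ifs <;> first | rfl | rw [PySem.Dict.getD_insert_of_ne _ _ _ h]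

theorem stepA_of_not_contains (d : PySem.Dict String String) (p : String × String)
    (h : d.contains p.1 = false) : mergeStepA d p = d.insert p.1 p.2 := by
  unfold mergeStepA
  split_ifs with h1 h2 h3 <;> simp_all

theorem getD_stepA_self (d : PySem.Dict String String) (p : String × String)
    (h : d.contains p.1 = true) :
    (mergeStepA d p).getD p.1 "" = resolveStep (d.getD p.1 "") p.2 := by
  unfold mergeStepA resolveStep
  split_ifs <;> simp_all [PySem.Dict.getD_insert_self]

theorem keys_stepA (d : PySem.Dict String String) (p : String × String) :
    (mergeStepA d p).keys = PySem.Set.add d.keys p.1 := by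
  have hmem : d.contains p.1 = true → PySem.Set.add d.keys p.1 = d.keys := by
    intro h
    exact PySem.Set.add_of_mem ((PySem.Dict.contains_iff_mem_keys _ _).mp h)
  unfold mergeStepA
  split_ifs with h1 h2 h3
  · by_cases hc : d.contains p.1
    · rw [PySem.Dict.keys_insert_of_contains _ _ hc, hmem hc]
    · rw [PySem.Dict.keys_insert_of_not_contains _ _ (by simp_all),
        PySem.Set.add_of_not_mem
          (fun hm => by simp_all [PySem.Dict.contains_iff_mem_keys])]
  · have hc : d.contains p.1 = true := by by_cases hc : d.contains p.1 <;> simp_all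
    rw [PySem.Dict.keys_insert_of_contains _ _ hc, hmem hc]
  · exact (hmem (by by_cases hc : d.contains p.1 <;> simp_all)).symm
  · exact (hmem (by by_cases hc : d.contains p.1 <;> simp_all)).symm

theorem keysA (L : List (String × String)) :
    ∀ (d : PySem.Dict String String),
      (L.foldl mergeStepA d).keys = PySem.Set.update d.keys (L.map (·.1)) := by
  induction L with
  | nil => intro d; rfl
  | cons p L ih =>
    intro d
    rw [List.foldl_cons, ih, List.map_cons, PySem.Set.update_cons, keys_stepA]

theorem getDA (L : List (String × String)) :
    ∀ (d : PySem.Dict String String) (k : String),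
      (L.foldl mergeStepA d).getD k "" =
        if d.contains k = true then (vsOf L k).foldl resolveStep (d.getD k "")
        else resolveGroup (vsOf L k) := by
  induction L with
  | nil =>
    intro d k
    by_cases hc : d.contains k = true
    · simp [vsOf, hc]
    · have hc' : d.contains k = false := by simp_all
      simp [vsOf, resolveGroup, hc', PySem.Dict.getD_of_not_contains _ _ hc']
  | cons p L ih =>
    intro d k
    rw [List.foldl_cons, ih]
    by_cases hk : p.1 = k
    · subst hk
      by_cases hc : d.contains p.1 = true
      · rw [contains_stepA, getD_stepA_self d p hc]
        simp [hc, vsOf]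
      · have hc' : d.contains p.1 = false := by simp_all
        rw [stepA_of_not_contains d p hc']
        simp [hc', PySem.Dict.contains_insert_self, PySem.Dict.getD_insert_self,
          vsOf, resolveGroup]
    · have hk' : k ≠ p.1 := fun h => hk h.symm
      rw [contains_stepA, getD_stepA_ne d p k hk']
      simp [vsOf, hk, hk']

-- ===== VERDICT (by name: the statement is the Claim_ definition above) =====
theorem merge_pages_dicts_spec : Claim_equal_merge_pages_dicts := by
  intro dicts _
  unfold Spec_merge_pages_dicts merge_pages_dicts merge_pages_dicts_alt
  rw [← List.foldl_flatten, ← List.foldl_flatten]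
  -- names for the two intermediate dicts over the flattened pair list
  set L := dicts.flatten with hL
  set A := L.foldl mergeStepA PySem.Dict.empty with hA
  set G := L.foldl (fun g p => g.modify p.1 [] (· ++ [p.2])) PySem.Dict.empty with hG
  -- A's keys are the distinct keys of L in first-occurrence order
  have hAkeys : A.keys = PySem.Set.ofList (L.map (·.1)) := by
    rw [hA, keysA, PySem.Dict.keys_empty, PySem.Set.update_nil_left]
  have hAnodup : A.keys.Nodup := by rw [hAkeys]; exact PySem.Set.nodup_ofList _
  -- so are G's
  have hGkeys : G.keys = PySem.Set.ofList (L.map (·.1)) := by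
    have h := PySem.Dict.keys_foldl_modify_key L (fun p => p.1) ([] : List String)
      (fun _ p l => l ++ [p.2]) PySem.Dict.empty
    rw [PySem.Dict.keys_empty, PySem.Set.update_nil_left] at h
    exact h
  have hGnodup : G.keys.Nodup := by rw [hGkeys]; exact PySem.Set.nodup_ofList _
  -- G's group for k is exactly vsOf L k
  have hGgetD : ∀ k, G.getD k [] = vsOf L k := by
    intro k
    have h := PySem.Dict.getD_foldl_modify_append L PySem.Dict.empty k
    rw [PySem.Dict.getD_empty] at h
    simpa [vsOf] using h
  -- B's second loop over fresh distinct keys just appends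
  have hout2 : (G.items.foldl (fun out p => out.insert p.1 (resolveGroup p.2))
      PySem.Dict.empty).items = G.items.map (fun p => (p.1, resolveGroup p.2)) := by
    have h := PySem.Dict.items_foldl_insert_fresh G.items (fun p => p.1)
      (fun p => resolveGroup p.2) PySem.Dict.empty
      (fun a _ => PySem.Dict.contains_empty a.1) hGnodup
    simpa using h
  rw [hout2, PySem.Dict.items_eq_map_keys G hGnodup ([] : List String),
    PySem.Dict.items_eq_map_keys A hAnodup "", hAkeys, hGkeys, List.map_map]
  refine List.map_congr_left (fun k hk => ?_)
  have hval : A.getD k "" = resolveGroup (vsOf L k) := by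
    rw [hA, getDA]
    simp [PySem.Dict.contains_empty]
  simp [Function.comp, hval, hGgetD k]
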